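-- pv_equiv track=rewrite | github.com/thom-heinrich/twinr | src/twinr/hardware/portrait_identity.py | _normalize_embedding_model_id
-- ===== SOURCE A (Python) =====
-- _EMBEDDING_VERSION = 1
--
-- def _normalize_text(value: object | None) -> str:
--     if value is None:
--         return ""
--     return " ".join(str(value).split())
--
-- def _normalize_embedding_model_id(value: object | None) -> str:
--     text = _normalize_text(value).strip().lower()
--     normalized: list[str] = []
--     previous_separator = False
--     for char in text:
--         if char.isalnum():
--             normalized.append(char)
--             previous_separator = False
--             continue
--         if char in {"-", "_", " ", "/", "."}:
--             if not previous_separator: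
--                 normalized.append("_")
--                 previous_separator = True
--     collapsed = "".join(normalized).strip("_")
--     return collapsed or f"portrait_embedding_v{_EMBEDDING_VERSION}"
-- ===== SOURCE B (Python) =====
-- _EMBEDDING_VERSION = 1
--
-- def _normalize_embedding_model_id(value):
--     text = "" if value is None else str(value).lower()
--     spaced = "".join(" " if c in "-_/." else c for c in text)
--     words = ["".join(c for c in tok if c.isalnum()) for tok in spaced.split()]
--     words = [w for w in words if w]
--     return "_".join(words) or f"portrait_embedding_v{_EMBEDDING_VERSION}"
-- ===== Notes on version B (the rewrite author's own statement) =====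
-- stated objective: idiomatic
-- what changed: Replaces the stateful character loop with a previous_separator flag and trailing-underscore stripping by a tokenize-and-join pipeline: map the separator characters to spaces, split on whitespace, keep each token's alphanumeric characters, drop empty tokens and join with underscores.
import Mathlib
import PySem

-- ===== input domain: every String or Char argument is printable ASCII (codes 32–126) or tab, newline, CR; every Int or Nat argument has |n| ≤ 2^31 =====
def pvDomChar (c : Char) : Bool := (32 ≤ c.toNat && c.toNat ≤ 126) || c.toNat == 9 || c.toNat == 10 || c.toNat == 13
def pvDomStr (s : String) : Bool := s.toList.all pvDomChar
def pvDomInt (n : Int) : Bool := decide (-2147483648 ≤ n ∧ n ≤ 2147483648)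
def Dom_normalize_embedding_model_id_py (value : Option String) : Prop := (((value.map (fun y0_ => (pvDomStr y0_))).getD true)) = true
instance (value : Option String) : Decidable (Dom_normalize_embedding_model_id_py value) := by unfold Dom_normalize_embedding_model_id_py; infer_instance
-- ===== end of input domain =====

-- B replaces A's stateful character loop (previous_separator flag + strip('_')) by an
-- idiomatic tokenize-and-join pipeline: map separators to spaces, split, keep alnum
-- chars per token, drop empty tokens, join with '_'.

-- ===== PORT A =====
def normalize_embedding_model_id_py (value : Option String) : String :=
  -- text = _normalize_text(value).strip().lower()
  let text0 : List Char := match value with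
    | none => []
    | some v => PySem.Chars.join [' '] (PySem.Chars.split₀ v.toList)
  let text : List Char := PySem.Chars.lower (PySem.Chars.strip text0)
  -- the for-loop over text with accumulator (normalized, previous_separator)
  let st := text.foldl (fun (st : List Char × Bool) c =>
      if PySem.Chars.isalnum c then (st.1 ++ [c], false)
      else if c ∈ ['-', '_', ' ', '/', '.'] then (if st.2 then st else (st.1 ++ ['_'], true))
      else st) (([] : List Char), false)
  let collapsed := PySem.Chars.stripChars st.1 ['_']
  if collapsed.isEmpty then String.ofList ("portrait_embedding_v".toList ++ PySem.Int.toChars 1)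
  else String.ofList collapsed

-- ===== PORT B =====
def normalize_embedding_model_id_py_alt (value : Option String) : String :=
  let text : List Char := PySem.Chars.lower (match value with | none => [] | some v => v.toList)
  let spaced : List Char := text.map (fun c => if c ∈ ['-', '_', '/', '.'] then ' ' else c)
  let words := (PySem.Chars.split₀ spaced).map (fun tok => tok.filter PySem.Chars.isalnum)
  let words2 := words.filter (fun w => !w.isEmpty)
  let joined := PySem.Chars.join ['_'] words2
  if joined.isEmpty then String.ofList ("portrait_embedding_v".toList ++ PySem.Int.toChars 1)
  else String.ofList joined

-- ===== PRECONDITION & SPEC =====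
def Spec_normalize_embedding_model_id_py (value : Option String) (out : String) : Prop := out = normalize_embedding_model_id_py_alt value
instance (value : Option String) (out : String) : Decidable (Spec_normalize_embedding_model_id_py value out) := by unfold Spec_normalize_embedding_model_id_py; infer_instance

-- ===== CLAIM (what is proved, stated in full; the proofs are below) =====
def Claim_equal_normalize_embedding_model_id_py : Prop := ∀ (value : Option String), Dom_normalize_embedding_model_id_py value → Spec_normalize_embedding_model_id_py value (normalize_embedding_model_id_py value)

-- ===== LEMMAS AND PROOFS =====

-- character classes
abbrev pvAL : Char → Bool := PySem.Chars.isalnum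
abbrev pvWS : Char → Bool := PySem.Chars.isspace
def pvSepB (c : Char) : Bool := c ∈ ['-', '_', '/', '.']
def pvSepA (c : Char) : Bool := c ∈ ['-', '_', ' ', '/', '.']
def pvQ (c : Char) : Bool := pvWS c || pvSepB c
def pvSub (c : Char) : Char := if c ∈ ['-', '_', '/', '.'] then ' ' else c

-- generic tokenizer: maximal runs of non-p characters
def pvTok (p : Char → Bool) : List Char → List (List Char)
  | [] => []
  | c :: r =>
    if p c then pvTok p r
    else (c :: r.takeWhile (fun d => !p d)) :: pvTok p (r.dropWhile (fun d => !p d))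
termination_by t => t.length
decreasing_by
  · simp
  · have := List.length_dropWhile_le (fun d => !p d) r
    simp; omega

-- words of t under separator class p: tokens, alnum-filtered, empties dropped
def pvW (p : Char → Bool) (t : List Char) : List (List Char) :=
  ((pvTok p t).map (fun w => w.filter pvAL)).filter (fun w => !w.isEmpty)

-- closed recursion of A's loop (state machine)
def pvR : List Char → Bool → List Char
  | [], _ => []
  | c :: r, prev =>
    if pvAL c then c :: pvR r false
    else if pvSepA c then (if prev then pvR r true else '_' :: pvR r true)
    else pvR r prev

-- closed form of pvR · false
def pvF (t : List Char) : List Char :=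
  ((t.takeWhile (fun c => !pvSepA c)).filter pvAL) ++
  (if h : (t.dropWhile (fun c => !pvSepA c)) = [] then []
   else '_' :: pvF (((t.dropWhile (fun c => !pvSepA c)).tail).dropWhile (fun c => !pvAL c)))
termination_by t.length
decreasing_by
  have h1 := List.length_dropWhile_le (fun c => !pvSepA c) t
  have h2 := List.length_dropWhile_le (fun c => !pvAL c) (t.dropWhile (fun c => !pvSepA c)).tail
  have h3 : (t.dropWhile (fun c => !pvSepA c)).tail.length =
      (t.dropWhile (fun c => !pvSepA c)).length - 1 := List.length_tail
  have h4 : 0 < (t.dropWhile (fun c => !pvSepA c)).length := List.length_pos_iff.mpr h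
  omega

def pvPreB (t : List Char) : Bool := (t.takeWhile (fun c => !pvAL c)).any pvSepA
def pvPostB (t : List Char) : Bool := (t.reverse.takeWhile (fun c => !pvAL c)).any pvSepA

-- ---- character facts ----
lemma pvSepA_not_AL {c : Char} (h : pvSepA c = true) : pvAL c = false := by
  simp only [pvSepA, List.mem_cons, List.not_mem_nil, or_false, decide_eq_true_eq] at h
  rcases h with rfl | rfl | rfl | rfl | rfl <;> decide
lemma pvAL_not_sepA {c : Char} (h : pvAL c = true) : pvSepA c = false := by
  by_contra h'
  rw [Bool.not_eq_false] at h'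
  rw [pvSepA_not_AL h'] at h
  exact Bool.false_ne_true h
lemma pvAL_ne_underscore {c : Char} (h : pvAL c = true) : (c == '_') = false := by
  by_contra h'
  rw [Bool.not_eq_false, beq_iff_eq] at h'
  subst h'
  exact absurd h (by decide)
lemma pvWS_lowerChar (c : Char) : pvWS (PySem.Chars.lowerChar c) = pvWS c := by
  unfold PySem.Chars.lowerChar
  by_cases hu : PySem.Chars.isupper c = true
  · simp only [hu, if_true]
    have hb : 65 ≤ c.toNat ∧ c.toNat ≤ 90 := by
      simp only [PySem.Chars.isupper, Bool.and_eq_true, decide_eq_true_eq, Char.le_def] at hu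
      exact ⟨hu.1, hu.2⟩
    have hv : (c.toNat + 32).isValidChar := Or.inl (by omega)
    have ht : (Char.ofNat (c.toNat + 32)).toNat = c.toNat + 32 := by simp [Char.ofNat, hv]
    show PySem.Chars.isspace _ = PySem.Chars.isspace c
    have h1 : PySem.Chars.isspace (Char.ofNat (c.toNat + 32)) = false := by
      simp only [PySem.Chars.isspace, ht]
      simp only [Bool.or_eq_false_iff, Bool.and_eq_false_iff, decide_eq_false_iff_not]
      omega
    have h2 : PySem.Chars.isspace c = false := by
      simp only [PySem.Chars.isspace]
      simp only [Bool.or_eq_false_iff, Bool.and_eq_false_iff, decide_eq_false_iff_not]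
      omega
    rw [h1, h2]
  · simp [hu]
lemma pvSepA_eq_q {c : Char} (h : pvWS c = false) : pvSepA c = pvQ c := by
  have hc : c ≠ ' ' := by rintro rfl; exact absurd h (by decide)
  simp only [pvQ, pvWS, h, Bool.false_or, pvSepA, pvSepB, List.mem_cons, List.not_mem_nil, or_false]
  simp only [decide_eq_decide]
  constructor
  · intro h'
    rcases h' with rfl | rfl | h'' | rfl | rfl
    · tauto
    · tauto
    · exact absurd h'' hc
    · tauto
    · tauto
  · tauto
lemma pvWS_sub (c : Char) : pvWS (pvSub c) = pvQ c := by
  unfold pvSub pvQ pvSepB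
  by_cases hm : c ∈ ['-', '_', '/', '.']
  · simp only [hm, if_true, decide_true, Bool.or_true]
    decide
  · simp [hm]
lemma pvSub_id {c : Char} (h : pvQ c = false) : pvSub c = c := by
  simp only [pvQ, Bool.or_eq_false_iff] at h
  have := h.2
  simp only [pvSepB, decide_eq_false_iff_not] at this
  simp [pvSub, this]

-- ---- pvTok equations and facts ----
lemma pvTok_nil (p : Char → Bool) : pvTok p [] = [] := by simp [pvTok]
lemma pvTok_cons_pos {p : Char → Bool} {c : Char} (r : List Char) (h : p c = true) :
    pvTok p (c :: r) = pvTok p r := by rw [pvTok]; simp [h]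
lemma pvTok_cons_neg {p : Char → Bool} {c : Char} (r : List Char) (h : p c = false) :
    pvTok p (c :: r) = (c :: r.takeWhile (fun d => !p d)) :: pvTok p (r.dropWhile (fun d => !p d)) := by
  rw [pvTok]; simp [h]
lemma pvTakeWhile_congr {p q : Char → Bool} {l : List Char} (h : ∀ x ∈ l, p x = q x) :
    l.takeWhile p = l.takeWhile q := by
  induction l with
  | nil => rfl
  | cons a t ih =>
    simp only [List.takeWhile_cons, h a List.mem_cons_self]
    split
    · rw [ih (fun x hx => h x (List.mem_cons_of_mem a hx))]
    · rfl

lemma pvDropWhile_congr {p q : Char → Bool} {l : List Char} (h : ∀ x ∈ l, p x = q x) :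
    l.dropWhile p = l.dropWhile q := by
  induction l with
  | nil => rfl
  | cons a t ih =>
    simp only [List.dropWhile_cons, h a List.mem_cons_self]
    split
    · exact ih (fun x hx => h x (List.mem_cons_of_mem a hx))
    · rfl

lemma pvDropWhile_head_false {p : Char → Bool} {l r : List Char} {e : Char}
    (h : l.dropWhile p = e :: r) : p e = false := by
  have := List.head?_dropWhile_not p l
  rw [h] at this
  simpa using this

lemma pvTok_sound {p : Char → Bool} : ∀ (t : List Char), ∀ w ∈ pvTok p t, w ≠ [] ∧ ∀ c ∈ w, p c = false := by
  intro t
  induction t using pvTok.induct p with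
  | case1 => simp [pvTok_nil]
  | case2 c r hpc ih => rw [pvTok_cons_pos r hpc]; exact ih
  | case3 c r hpc ih =>
    rw [pvTok_cons_neg r (by simpa using hpc)]
    intro w hw
    rcases List.mem_cons.mp hw with rfl | hw'
    · refine ⟨List.cons_ne_nil _ _, ?_⟩
      intro x hx
      rcases List.mem_cons.mp hx with rfl | hx'
      · simpa using hpc
      · have := List.mem_takeWhile_imp hx'
        simpa using this
    · exact ih w hw'
lemma pvTok_all_neg {p : Char → Bool} {w : List Char} (h : ∀ c ∈ w, p c = false) (hw : w ≠ []) :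
    pvTok p w = [w] := by
  cases w with
  | nil => exact absurd rfl hw
  | cons c r =>
    rw [pvTok_cons_neg r (h c List.mem_cons_self)]
    have htw : r.takeWhile (fun d => !p d) = r :=
      List.takeWhile_eq_self_iff.mpr (fun x hx => by simp [h x (List.mem_cons_of_mem c hx)])
    have hdw : r.dropWhile (fun d => !p d) = [] :=
      List.dropWhile_eq_nil_iff.mpr (fun x hx => by simp [h x (List.mem_cons_of_mem c hx)])
    rw [htw, hdw, pvTok_nil]
lemma pvTok_append_boundary {p : Char → Bool} {d : Char} (hd : p d = true) :
    ∀ (x b : List Char), pvTok p (x ++ d :: b) = pvTok p x ++ pvTok p b := by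
  intro x b
  induction x using pvTok.induct p with
  | case1 => simp [pvTok_nil, pvTok_cons_pos b hd]
  | case2 c r hpc ih => simpa [pvTok_cons_pos _ hpc] using ih
  | case3 c r hpc ih =>
    have hpc' : p c = false := by simpa using hpc
    rw [List.cons_append, pvTok_cons_neg _ hpc', pvTok_cons_neg _ hpc']
    by_cases hall : ∀ x ∈ r, p x = false
    · have htw : r.takeWhile (fun e => !p e) = r :=
        List.takeWhile_eq_self_iff.mpr (fun x hx => by simp [hall x hx])
      have hdw : r.dropWhile (fun e => !p e) = [] :=
        List.dropWhile_eq_nil_iff.mpr (fun x hx => by simp [hall x hx])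
      have htw2 : (r ++ d :: b).takeWhile (fun e => !p e) = r := by
        rw [List.takeWhile_append]
        simp [htw, hd]
      have hdw2 : (r ++ d :: b).dropWhile (fun e => !p e) = d :: b := by
        rw [List.dropWhile_append]
        simp [hdw, hd]
      rw [htw2, hdw2, htw, hdw, pvTok_nil, pvTok_cons_pos _ hd]
      simp
    · have hne : r.dropWhile (fun e => !p e) ≠ [] := by
        intro hnil
        exact hall (fun x hx => by simpa using List.dropWhile_eq_nil_iff.mp hnil x hx)
      have htw2 : (r ++ d :: b).takeWhile (fun e => !p e) = r.takeWhile (fun e => !p e) := by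
        rw [List.takeWhile_append]
        split
        · next hlen =>
            exfalso
            have hself : r.takeWhile (fun e => !p e) = r :=
              (List.takeWhile_prefix _).eq_of_length hlen
            refine hne (List.dropWhile_eq_nil_iff.mpr (fun x hx => ?_))
            have h2 : x ∈ r.takeWhile (fun e => !p e) := by rw [hself]; exact hx
            simpa using List.mem_takeWhile_imp h2
        · rfl
      have hdw2 : (r ++ d :: b).dropWhile (fun e => !p e) = r.dropWhile (fun e => !p e) ++ d :: b := by
        rw [List.dropWhile_append]
        simp [hne]
      rw [htw2, hdw2, ih]
      simp
lemma pvTok_map {p q : Char → Bool} {f : Char → Char} (hpq : ∀ c, p (f c) = q c) :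
    ∀ (t : List Char), pvTok p (t.map f) = (pvTok q t).map (List.map f) := by
  intro t
  induction t using pvTok.induct q with
  | case1 => simp [pvTok_nil]
  | case2 c r hqc ih =>
    rw [List.map_cons, pvTok_cons_pos _ (by rw [hpq]; exact hqc), pvTok_cons_pos _ hqc]
    exact ih
  | case3 c r hqc ih =>
    have hqc' : q c = false := by simpa using hqc
    have hfuns : ((fun e => !p e) ∘ f) = (fun e => !q e) := by
      funext e; simp [hpq e]
    rw [List.map_cons, pvTok_cons_neg _ (by rw [hpq]; exact hqc'), pvTok_cons_neg _ hqc',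
      List.takeWhile_map, List.dropWhile_map, hfuns]
    rw [ih]
    simp
lemma pvTok_congr {p q : Char → Bool} : ∀ (t : List Char), (∀ c ∈ t, p c = q c) → pvTok p t = pvTok q t := by
  intro t
  induction t using pvTok.induct p with
  | case1 => intro _; simp [pvTok_nil]
  | case2 c r hpc ih =>
    intro h
    rw [pvTok_cons_pos _ hpc, pvTok_cons_pos _ (by rw [← h c List.mem_cons_self]; exact hpc)]
    exact ih (fun x hx => h x (List.mem_cons_of_mem c hx))
  | case3 c r hpc ih =>
    intro h
    have hpc' : p c = false := by simpa using hpc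
    have hr : ∀ x ∈ r, p x = q x := fun x hx => h x (List.mem_cons_of_mem c hx)
    have htw : r.takeWhile (fun e => !p e) = r.takeWhile (fun e => !q e) :=
      pvTakeWhile_congr (fun x hx => by rw [hr x hx])
    have hdw : r.dropWhile (fun e => !p e) = r.dropWhile (fun e => !q e) := by
      exact pvDropWhile_congr (fun x hx => by rw [hr x hx])
    rw [pvTok_cons_neg _ hpc', pvTok_cons_neg _ (by rw [← h c List.mem_cons_self]; exact hpc'),
      htw, ← hdw]
    rw [ih (fun x hx => hr x ((List.dropWhile_sublist _).subset hx))]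
lemma pvTok_refine {p q : Char → Bool} (hpq : ∀ c, p c = true → q c = true) :
    ∀ (t : List Char), pvTok q t = (pvTok p t).flatMap (pvTok q) := by
  intro t
  induction t using pvTok.induct p with
  | case1 => simp [pvTok_nil]
  | case2 c r hpc ih =>
    rw [pvTok_cons_pos _ hpc, pvTok_cons_pos _ (hpq c hpc)]
    exact ih
  | case3 c r hpc ih =>
    have hpc' : p c = false := by simpa using hpc
    rw [pvTok_cons_neg _ hpc']
    have hsplit : c :: r = (c :: r.takeWhile (fun e => !p e)) ++ r.dropWhile (fun e => !p e) := by
      rw [List.cons_append, List.takeWhile_append_dropWhile]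
    rw [hsplit]
    cases hdw : r.dropWhile (fun e => !p e) with
    | nil => simp [hdw, pvTok_nil]
    | cons e dw' =>
      have hpe : p e = true := by
        have := pvDropWhile_head_false hdw
        simpa using this
      rw [pvTok_append_boundary (hpq e hpe), List.flatMap_cons, ← pvTok_cons_pos dw' (hpq e hpe)]
      rw [hdw] at ih
      rw [ih]

-- ---- general list helpers ----
lemma pvTakeWhile_append_left {p : Char → Bool} {a : List Char} (b : List Char)
    (h : ¬ ∀ x ∈ a, p x = true) : (a ++ b).takeWhile p = a.takeWhile p := by
  rw [List.takeWhile_append]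
  split
  · next hlen =>
      exact absurd (fun x hx => List.mem_takeWhile_imp
        (((List.takeWhile_prefix p).eq_of_length hlen).symm ▸ hx)) h
  · rfl

lemma pvTakeWhile_append_all {p : Char → Bool} {a : List Char} (b : List Char)
    (h : ∀ x ∈ a, p x = true) : (a ++ b).takeWhile p = a ++ b.takeWhile p := by
  rw [List.takeWhile_append]
  have : a.takeWhile p = a := List.takeWhile_eq_self_iff.mpr h
  simp [this]

lemma pvDropWhile_eq_self {p : Char → Bool} {l : List Char} (h : ∀ x ∈ l.head?, p x = false) :
    l.dropWhile p = l := by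
  cases l with
  | nil => rfl
  | cons a t => simp [List.dropWhile_cons, h a rfl]

lemma pvFilter_nil_all {p : Char → Bool} {l : List Char} (h : l.filter p = []) :
    ∀ x ∈ l, p x = false := by
  intro x hx
  by_contra hc
  rw [Bool.not_eq_false] at hc
  have : x ∈ l.filter p := List.mem_filter.mpr ⟨hx, hc⟩
  simp [h] at this

lemma pvAny_not_all {p : Char → Bool} {l : List Char} (h : l.any p = true) :
    ¬ ∀ x ∈ l, (!p x) = true := by
  simp only [List.any_eq_true] at h
  obtain ⟨x, hx, hpx⟩ := h
  intro hall
  have := hall x hx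
  rw [hpx] at this
  simp at this

-- ---- join helpers ----
lemma pvJoin_cons_head (d c : Char) (w : List Char) (ws : List (List Char)) :
    PySem.Chars.join [d] ((c :: w) :: ws) = c :: PySem.Chars.join [d] (w :: ws) := by
  cases ws with
  | nil => simp [PySem.Chars.join_singleton]
  | cons y zs => rw [PySem.Chars.join_cons_cons, PySem.Chars.join_cons_cons]; simp

lemma pvJoin_bounds' (d : Char) (P : Char → Bool) :
    ∀ (ws : List (List Char)), ws ≠ [] → (∀ w ∈ ws, w ≠ [] ∧ ∀ c ∈ w, P c = true) →
    PySem.Chars.join [d] ws ≠ [] ∧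
    (∀ h' ∈ (PySem.Chars.join [d] ws).head?, P h' = true) ∧
    (∀ l ∈ (PySem.Chars.join [d] ws).getLast?, P l = true) := by
  intro ws
  induction ws with
  | nil => intro h; exact absurd rfl h
  | cons w ps ih =>
    intro _ h
    have hw := h w List.mem_cons_self
    cases ps with
    | nil =>
      rw [PySem.Chars.join_singleton]
      refine ⟨hw.1, ?_, ?_⟩
      · intro h' hh'
        exact hw.2 h' (List.mem_of_mem_head? hh')
      · intro l hl
        exact hw.2 l (List.mem_of_getLast? hl)
    | cons y zs =>
      have ihr := ih (List.cons_ne_nil _ _) (fun x hx => h x (List.mem_cons_of_mem w hx))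
      rw [PySem.Chars.join_cons_cons, List.append_assoc]
      refine ⟨by simp [hw.1], ?_, ?_⟩
      · rw [List.head?_append_of_ne_nil _ hw.1]
        intro h' hh'
        exact hw.2 h' (List.mem_of_mem_head? hh')
      · rw [List.getLast?_append_of_ne_nil _ (by simp [ihr.1])]
        rw [List.getLast?_append_of_ne_nil _ ihr.1]
        exact ihr.2.2

-- ---- pvW equations ----
lemma pvW_nil (p : Char → Bool) : pvW p [] = [] := by simp [pvW, pvTok_nil]

lemma pvW_cons_pos {p : Char → Bool} {c : Char} (r : List Char) (h : p c = true) :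
    pvW p (c :: r) = pvW p r := by simp [pvW, pvTok_cons_pos r h]

lemma pvW_cons_neg {p : Char → Bool} {c : Char} (r : List Char) (h : p c = false) :
    pvW p (c :: r) =
      (if ((c :: r.takeWhile (fun d => !p d)).filter pvAL).isEmpty then
        pvW p (r.dropWhile (fun d => !p d))
      else ((c :: r.takeWhile (fun d => !p d)).filter pvAL) :: pvW p (r.dropWhile (fun d => !p d))) := by
  rw [pvW, pvTok_cons_neg r h, List.map_cons, List.filter_cons]
  by_cases hf : ((c :: r.takeWhile (fun d => !p d)).filter pvAL).isEmpty = true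
  · simp only [hf, Bool.not_true, if_neg Bool.false_ne_true, if_pos rfl, if_pos trivial]
    rfl
  · have hf' : ((c :: r.takeWhile (fun d => !p d)).filter pvAL).isEmpty = false := by
      simpa using hf
    simp only [hf', Bool.not_false, if_pos rfl, if_pos trivial, if_neg Bool.false_ne_true]
    rfl

lemma pvW_junk {p : Char → Bool} {c : Char} (r : List Char) (hp : p c = false) (ha : pvAL c = false) :
    pvW p (c :: r) = pvW p r := by
  rw [pvW_cons_neg r hp]
  have hfc : (c :: r.takeWhile (fun d => !p d)).filter pvAL = (r.takeWhile (fun d => !p d)).filter pvAL := by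
    rw [List.filter_cons]
    simp [ha]
  rw [hfc]
  cases r with
  | nil => simp [pvW_nil]
  | cons d r2 =>
    by_cases hd : p d = true
    · have h1 : (d :: r2).takeWhile (fun e => !p e) = [] := by simp [List.takeWhile_cons, hd]
      have h2 : (d :: r2).dropWhile (fun e => !p e) = d :: r2 := by simp [List.dropWhile_cons, hd]
      rw [h1, h2]
      simp
    · have hd' : p d = false := by simpa using hd
      have h1 : (d :: r2).takeWhile (fun e => !p e) = d :: r2.takeWhile (fun e => !p e) := by
        simp [List.takeWhile_cons, hd']
      have h2 : (d :: r2).dropWhile (fun e => !p e) = r2.dropWhile (fun e => !p e) := by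
        simp [List.dropWhile_cons, hd']
      rw [h1, h2, pvW_cons_neg r2 hd']

lemma pvW_TD {p : Char → Bool} {t : List Char}
    (hAL : (t.takeWhile (fun d => !p d)).any pvAL = true) :
    pvW p t = ((t.takeWhile (fun d => !p d)).filter pvAL) :: pvW p (t.dropWhile (fun d => !p d)) := by
  cases t with
  | nil => simp at hAL
  | cons c r =>
    by_cases hc : p c = true
    · rw [List.takeWhile_cons] at hAL
      simp [hc] at hAL
    · have hc' : p c = false := by simpa using hc
      have htw : (c :: r).takeWhile (fun d => !p d) = c :: r.takeWhile (fun d => !p d) := by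
        simp [List.takeWhile_cons, hc']
      have hdw : (c :: r).dropWhile (fun d => !p d) = r.dropWhile (fun d => !p d) := by
        simp [List.dropWhile_cons, hc']
      rw [htw, hdw]
      rw [htw] at hAL
      rw [pvW_cons_neg r hc']
      have hne : ((c :: r.takeWhile (fun d => !p d)).filter pvAL) ≠ [] := by
        intro hnil
        exact pvAny_not_all hAL (fun x hx => by simp [pvFilter_nil_all hnil x hx])
      simp only [List.isEmpty_iff]
      rw [if_neg hne]

lemma pvW_TD_empty {p : Char → Bool} {t : List Char}
    (h : (t.takeWhile (fun d => !p d)).any pvAL = false) :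
    pvW p t = pvW p (t.dropWhile (fun d => !p d)) := by
  cases t with
  | nil => rfl
  | cons c r =>
    by_cases hc : p c = true
    · have hdw : (c :: r).dropWhile (fun d => !p d) = c :: r := by
        simp [hc]
      rw [hdw]
    · have hc' : p c = false := by simpa using hc
      have htw : (c :: r).takeWhile (fun d => !p d) = c :: r.takeWhile (fun d => !p d) := by
        simp [List.takeWhile_cons, hc']
      have hdw : (c :: r).dropWhile (fun d => !p d) = r.dropWhile (fun d => !p d) := by
        simp [List.dropWhile_cons, hc']
      rw [htw] at h
      rw [hdw, pvW_cons_neg r hc']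
      have hnil : ((c :: r.takeWhile (fun d => !p d)).filter pvAL) = [] := by
        rw [List.filter_eq_nil_iff]
        intro x hx
        exact (List.any_eq_false.mp h) x hx
      simp [hnil]

lemma pvW_noAL {p : Char → Bool} : ∀ (t : List Char), t.all (fun c => !pvAL c) = true → pvW p t = [] := by
  intro t
  induction t using pvTok.induct p with
  | case1 => intro _; exact pvW_nil p
  | case2 c r hpc ih =>
    intro h
    rw [List.all_cons, Bool.and_eq_true] at h
    rw [pvW_cons_pos r hpc]
    exact ih h.2
  | case3 c r hpc ih =>
    intro h
    rw [List.all_cons, Bool.and_eq_true] at h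
    have hc' : p c = false := by simpa using hpc
    have hAL : (((c :: r).takeWhile (fun d => !p d)).any pvAL) = false := by
      rw [Bool.eq_false_iff]
      intro hany
      refine pvAny_not_all hany (fun x hx => ?_)
      rcases List.mem_cons.mp ((List.takeWhile_sublist _).subset hx) with rfl | hx'
      · exact h.1
      · exact (List.all_eq_true.mp h.2) x hx'
    rw [pvW_TD_empty hAL]
    rw [List.dropWhile_cons]
    simp only [hc', Bool.not_false, if_pos rfl, if_pos trivial]
    exact ih (List.all_eq_true.mpr (fun x hx =>
      (List.all_eq_true.mp h.2) x ((List.dropWhile_sublist _).subset hx)))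

lemma pvW_words {p : Char → Bool} (t : List Char) :
    ∀ w ∈ pvW p t, w ≠ [] ∧ ∀ c ∈ w, pvAL c = true := by
  intro w hw
  rw [pvW, List.mem_filter] at hw
  obtain ⟨hmem, hne⟩ := hw
  obtain ⟨tok, _, rfl⟩ := List.mem_map.mp hmem
  refine ⟨by simpa [List.isEmpty_iff] using hne, ?_⟩
  intro c hc
  exact List.of_mem_filter hc

lemma pvW_hasAL {p : Char → Bool} (hap : ∀ c, pvAL c = true → p c = false) :
    ∀ (t : List Char), t.any pvAL = true → pvW p t ≠ [] := by
  intro t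
  induction t using pvTok.induct p with
  | case1 => intro h; simp at h
  | case2 c r hpc ih =>
    intro h
    rw [List.any_cons, Bool.or_eq_true] at h
    rcases h with hc | hr
    · rw [hap c hc] at hpc; exact absurd hpc (by simp)
    · rw [pvW_cons_pos r hpc]; exact ih hr
  | case3 c r hpc ih =>
    intro h
    have hc' : p c = false := by simpa using hpc
    by_cases htw : (((c :: r).takeWhile (fun d => !p d)).any pvAL) = true
    · rw [pvW_TD htw]
      exact List.cons_ne_nil _ _
    · have htw' := Bool.eq_false_iff.mpr htw
      rw [pvW_TD_empty htw']
      rw [List.dropWhile_cons]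
      simp only [hc', Bool.not_false, if_pos rfl, if_pos trivial]
      apply ih
      -- any pvAL holds on r, but not on the takeWhile part, hence on the dropWhile part
      have hsplit : (c :: r).any pvAL =
          (((c :: r).takeWhile (fun d => !p d)).any pvAL || (((c :: r).dropWhile (fun d => !p d)).any pvAL)) := by
        conv_lhs => rw [← List.takeWhile_append_dropWhile (p := fun d => !p d) (l := c :: r)]
        rw [List.any_append]
      rw [hsplit, htw', Bool.false_or] at h
      rw [List.dropWhile_cons] at h
      simpa [hc'] using h

lemma pvW_dropNotAL {p : Char → Bool} (hap : ∀ c, pvAL c = true → p c = false) :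
    ∀ (t : List Char), pvW p (t.dropWhile (fun c => !pvAL c)) = pvW p t := by
  intro t
  induction t with
  | nil => rfl
  | cons c r ih =>
    rw [List.dropWhile_cons]
    by_cases hc : pvAL c = true
    · simp [hc]
    · have hc' : pvAL c = false := by simpa using hc
      simp only [hc', Bool.not_false, if_pos rfl, if_pos trivial]
      rw [ih]
      by_cases hp : p c = true
      · rw [pvW_cons_pos r hp]
      · rw [pvW_junk r (by simpa using hp) hc']

lemma pvW_append_boundary {p : Char → Bool} {d : Char} (hd : p d = true) (x b : List Char) :
    pvW p (x ++ d :: b) = pvW p x ++ pvW p b := by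
  rw [pvW, pvW, pvW, pvTok_append_boundary hd, List.map_append, List.filter_append]

lemma pvW_join {p : Char → Bool} {d : Char} (hd : p d = true) (parts : List (List Char)) :
    pvW p (PySem.Chars.join [d] parts) = parts.flatMap (pvW p) := by
  induction parts with
  | nil => simp [PySem.Chars.join_nil, pvW_nil]
  | cons w ps ih =>
    cases ps with
    | nil => simp [PySem.Chars.join_singleton]
    | cons y zs =>
      rw [PySem.Chars.join_cons_cons, List.append_assoc, List.singleton_append,
        pvW_append_boundary hd, ih]
      simp

lemma pvW_congr {p q : Char → Bool} (t : List Char) (h : ∀ c ∈ t, p c = q c) :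
    pvW p t = pvW q t := by
  rw [pvW, pvW, pvTok_congr t h]

-- ---- A's fold = pvR, pvR = pvF ----
lemma pvFold_R : ∀ (t : List Char) (acc : List Char) (prev : Bool),
    (t.foldl (fun (st : List Char × Bool) c =>
      if PySem.Chars.isalnum c then (st.1 ++ [c], false)
      else if c ∈ ['-', '_', ' ', '/', '.'] then (if st.2 then st else (st.1 ++ ['_'], true))
      else st) (acc, prev)).1 = acc ++ pvR t prev := by
  intro t
  induction t with
  | nil => intro acc prev; simp [pvR]
  | cons c r ih =>
    intro acc prev
    rw [List.foldl_cons]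
    by_cases hAL : PySem.Chars.isalnum c = true
    · simp only [hAL, if_pos rfl, if_pos trivial]
      rw [ih]
      simp [pvR, hAL]
    · have hAL' : PySem.Chars.isalnum c = false := by simpa using hAL
      by_cases hm : c ∈ ['-', '_', ' ', '/', '.']
      · have hsep : pvSepA c = true := by simpa [pvSepA] using hm
        simp only [hAL', if_neg (Bool.false_ne_true), if_pos hm]
        cases prev with
        | true => rw [ih]; simp [pvR, hAL', hsep]
        | false =>
          rw [if_neg (Bool.false_ne_true), ih]
          simp [pvR, hAL', hsep]
      · have hsep : pvSepA c = false := by simpa [pvSepA] using hm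
        simp only [hAL', if_neg (Bool.false_ne_true), if_neg hm]
        rw [ih]
        simp [pvR, hAL', hsep]

lemma pvF_nil : pvF [] = [] := by rw [pvF]; simp

lemma pvF_cons_AL {c : Char} (r : List Char) (h : pvAL c = true) : pvF (c :: r) = c :: pvF r := by
  conv_lhs => rw [pvF]
  conv_rhs => rw [pvF]
  simp [List.takeWhile_cons, List.dropWhile_cons, pvAL_not_sepA h, h]

lemma pvF_cons_sep {c : Char} (r : List Char) (h : pvSepA c = true) :
    pvF (c :: r) = '_' :: pvF (r.dropWhile (fun d => !pvAL d)) := by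
  conv_lhs => rw [pvF]
  simp [List.takeWhile_cons, List.dropWhile_cons, h]

lemma pvF_cons_junk {c : Char} (r : List Char) (ha : pvAL c = false) (hs : pvSepA c = false) :
    pvF (c :: r) = pvF r := by
  conv_lhs => rw [pvF]
  conv_rhs => rw [pvF]
  simp [List.takeWhile_cons, List.dropWhile_cons, ha, hs]

lemma pvR_eq_F : ∀ (t : List Char), pvR t false = pvF t ∧ pvR t true = pvF (t.dropWhile (fun c => !pvAL c)) := by
  intro t
  induction t with
  | nil => exact ⟨by simp [pvR, pvF_nil], by simp [pvR, pvF_nil]⟩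
  | cons c r ih =>
    by_cases hAL : pvAL c = true
    · constructor
      · show pvR (c :: r) false = pvF (c :: r)
        rw [pvF_cons_AL r hAL]
        simp only [pvR, hAL, if_pos rfl, if_pos trivial]
        rw [ih.1]
      · rw [List.dropWhile_cons]
        simp only [hAL, Bool.not_true, if_neg (Bool.false_ne_true)]
        rw [pvF_cons_AL r hAL]
        simp only [pvR, hAL, if_pos rfl, if_pos trivial]
        rw [ih.1]
    · have hAL' : pvAL c = false := by simpa using hAL
      by_cases hsep : pvSepA c = true
      · constructor
        · rw [pvF_cons_sep r hsep]
          simp only [pvR, hAL', if_neg (Bool.false_ne_true), hsep, if_pos rfl, if_pos trivial]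
          rw [ih.2]
        · rw [List.dropWhile_cons]
          simp only [hAL', Bool.not_false, if_pos rfl, if_pos trivial]
          simp only [pvR, hAL', if_neg (Bool.false_ne_true), hsep, if_pos rfl, if_pos trivial]
          rw [ih.2]
      · have hsep' : pvSepA c = false := by simpa using hsep
        constructor
        · rw [pvF_cons_junk r hAL' hsep']
          simp only [pvR, hAL', hsep', if_neg (Bool.false_ne_true)]
          exact ih.1
        · rw [List.dropWhile_cons]
          simp only [hAL', Bool.not_false, if_pos rfl, if_pos trivial]
          simp only [pvR, hAL', hsep', if_neg (Bool.false_ne_true)]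
          exact ih.2

-- ---- pvPreB / pvPostB equations ----
lemma pvPreB_cons_AL {c : Char} (r : List Char) (h : pvAL c = true) : pvPreB (c :: r) = false := by
  simp [pvPreB, List.takeWhile_cons, h]

lemma pvPreB_cons_notAL {c : Char} (r : List Char) (h : pvAL c = false) :
    pvPreB (c :: r) = (pvSepA c || pvPreB r) := by
  simp [pvPreB, List.takeWhile_cons, h]

lemma pvPreB_of_tw : ∀ (r : List Char), (r.takeWhile (fun c => !pvSepA c)).any pvAL = true → pvPreB r = false := by
  intro r
  induction r with
  | nil => intro h; simp at h
  | cons c r2 ih =>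
    intro h
    by_cases hAL : pvAL c = true
    · exact pvPreB_cons_AL r2 hAL
    · have hAL' : pvAL c = false := by simpa using hAL
      rw [List.takeWhile_cons] at h
      by_cases hsep : pvSepA c = true
      · simp [hsep] at h
      · have hsep' : pvSepA c = false := by simpa using hsep
        simp only [hsep', Bool.not_false, if_pos rfl, if_pos trivial, List.any_cons, hAL', Bool.false_or] at h
        rw [pvPreB_cons_notAL r2 hAL', hsep', Bool.false_or]
        exact ih h

lemma pvPreB_true_of_sep_first {r : List Char} {e : Char} {r3 : List Char}
    (hall : (r.takeWhile (fun c => !pvSepA c)).any pvAL = false)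
    (hdw : r.dropWhile (fun c => !pvSepA c) = e :: r3) : pvPreB r = true := by
  have hsepE : pvSepA e = true := by
    have := pvDropWhile_head_false hdw
    simpa using this
  have hsplit : r = r.takeWhile (fun c => !pvSepA c) ++ (e :: r3) := by
    rw [← hdw, List.takeWhile_append_dropWhile]
  rw [pvPreB, hsplit]
  rw [pvTakeWhile_append_all _ (fun x hx => by
    have := (List.any_eq_false.mp hall) x hx
    simpa using this)]
  rw [List.takeWhile_cons]
  simp only [pvSepA_not_AL hsepE, Bool.not_false, if_pos rfl, if_pos trivial]
  rw [List.any_append, List.any_cons, hsepE]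
  simp

lemma pvPostB_cons_anyAL {c : Char} {r : List Char} (h : r.any pvAL = true) :
    pvPostB (c :: r) = pvPostB r := by
  rw [pvPostB, pvPostB, List.reverse_cons]
  rw [pvTakeWhile_append_left _ (by
    intro hall
    refine pvAny_not_all (p := pvAL) (by rwa [List.any_reverse]) ?_
    intro x hx
    exact hall x hx)]

lemma pvPostB_AL_noALr {c : Char} {r : List Char} (hc : pvAL c = true)
    (h : r.all (fun d => !pvAL d) = true) : pvPostB (c :: r) = r.any pvSepA := by
  rw [pvPostB, List.reverse_cons]
  rw [pvTakeWhile_append_all _ (fun x hx => by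
    exact (List.all_eq_true.mp h) x (List.mem_reverse.mp hx))]
  rw [List.takeWhile_cons]
  simp [hc, List.any_reverse]

lemma pvPostB_dropNotAL {t : List Char}
    (h : (t.dropWhile (fun c => !pvAL c)).any pvAL = true) :
    pvPostB t = pvPostB (t.dropWhile (fun c => !pvAL c)) := by
  rw [pvPostB, pvPostB]
  conv_lhs => rw [← List.takeWhile_append_dropWhile (p := fun c => !pvAL c) (l := t)]
  rw [List.reverse_append]
  rw [pvTakeWhile_append_left _ (by
    intro hall
    refine pvAny_not_all (p := pvAL) (by rwa [List.any_reverse]) ?_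
    intro x hx
    exact hall x hx)]

-- ---- closed form of pvF ----
lemma pvNotAll_any {p : Char → Bool} {l : List Char} (h : ¬ l.all (fun c => !p c) = true) :
    l.any p = true := by
  by_contra hc
  have hf : l.any p = false := by simpa using hc
  exact h (List.all_eq_true.mpr (fun x hx => by simp [(List.any_eq_false.mp hf) x hx]))

lemma pvF_noAL : ∀ (t : List Char), t.all (fun c => !pvAL c) = true →
    pvF t = (if t.any pvSepA then ['_'] else []) := by
  intro t
  induction t with
  | nil => intro _; simp [pvF_nil]
  | cons c r ih =>
    intro h
    rw [List.all_cons, Bool.and_eq_true] at h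
    have hc : pvAL c = false := by simpa using h.1
    by_cases hsep : pvSepA c = true
    · rw [pvF_cons_sep r hsep]
      have hdrop : r.dropWhile (fun d => !pvAL d) = [] :=
        List.dropWhile_eq_nil_iff.mpr (fun x hx => by
          simpa using (List.all_eq_true.mp h.2) x hx)
      rw [hdrop, pvF_nil]
      simp [List.any_cons, hsep]
    · have hsep' : pvSepA c = false := by simpa using hsep
      rw [pvF_cons_junk r hc hsep', ih h.2]
      simp [List.any_cons, hsep']

lemma pvF_char : ∀ (t : List Char), pvF t =
    if t.all (fun c => !pvAL c) then (if t.any pvSepA then ['_'] else [])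
    else (if pvPreB t then ['_'] else []) ++ PySem.Chars.join ['_'] (pvW pvSepA t)
         ++ (if pvPostB t then ['_'] else []) := by
  suffices H : ∀ (n : Nat) (t : List Char), t.length ≤ n → pvF t =
      if t.all (fun c => !pvAL c) then (if t.any pvSepA then ['_'] else [])
      else (if pvPreB t then ['_'] else []) ++ PySem.Chars.join ['_'] (pvW pvSepA t)
           ++ (if pvPostB t then ['_'] else []) by
    exact fun t => H t.length t le_rfl
  intro n
  induction n with
  | zero =>
    intro t ht
    rw [List.length_eq_zero_iff.mp (Nat.le_zero.mp ht)]
    simp [pvF_nil]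
  | succ n ih =>
    intro t ht
    by_cases hall : t.all (fun c => !pvAL c) = true
    · rw [if_pos hall]
      exact pvF_noAL t hall
    · rw [if_neg hall]
      cases t with
      | nil => simp at hall
      | cons c r =>
        rw [List.length_cons, Nat.succ_le_succ_iff] at ht
        rw [List.all_cons, Bool.and_eq_true] at hall
        by_cases hAL : pvAL c = true
        · -- c alphanumeric
          rw [pvF_cons_AL r hAL, pvPreB_cons_AL r hAL]
          have htw : ((c :: r).takeWhile (fun d => !pvSepA d)).any pvAL = true := by
            rw [List.takeWhile_cons]
            simp [pvAL_not_sepA hAL, hAL]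
          have htwc : (c :: r).takeWhile (fun d => !pvSepA d) = c :: r.takeWhile (fun d => !pvSepA d) := by
            simp [List.takeWhile_cons, pvAL_not_sepA hAL]
          have hdwc : (c :: r).dropWhile (fun d => !pvSepA d) = r.dropWhile (fun d => !pvSepA d) := by
            simp [List.dropWhile_cons, pvAL_not_sepA hAL]
          by_cases hrall : r.all (fun d => !pvAL d) = true
          · -- r has no alnum: the only word is [c]
            rw [pvF_noAL r hrall]
            rw [pvW_TD htw]
            have hfil : ((c :: r).takeWhile (fun d => !pvSepA d)).filter pvAL = [c] := by
              rw [htwc, List.filter_cons]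
              simp only [hAL, if_pos rfl, if_pos trivial]
              congr 1
              rw [List.filter_eq_nil_iff]
              intro x hx
              have := (List.all_eq_true.mp hrall) x ((List.takeWhile_sublist _).subset hx)
              simpa using this
            have hWdw : pvW pvSepA ((c :: r).dropWhile (fun d => !pvSepA d)) = [] := by
              rw [hdwc]
              apply pvW_noAL
              rw [List.all_eq_true]
              intro x hx
              exact (List.all_eq_true.mp hrall) x ((List.dropWhile_sublist _).subset hx)
            rw [hfil, hWdw, PySem.Chars.join_singleton, pvPostB_AL_noALr hAL hrall]
            cases hany : r.any pvSepA <;> simp [hany]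
          · -- r contains an alnum
            have hrany : r.any pvAL = true := pvNotAll_any hrall
            have ihr := ih r ht
            rw [ihr, if_neg hrall, pvPostB_cons_anyAL (c := c) hrany]
            by_cases htwAL : ((r.takeWhile (fun d => !pvSepA d)).any pvAL) = true
            · -- first token of r itself contains an alnum
              rw [pvPreB_of_tw r htwAL]
              have hWr := pvW_TD htwAL
              have hWcr : pvW pvSepA (c :: r) =
                  (c :: (r.takeWhile (fun d => !pvSepA d)).filter pvAL) ::
                    pvW pvSepA (r.dropWhile (fun d => !pvSepA d)) := by
                rw [pvW_TD htw, htwc, hdwc, List.filter_cons]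
                simp only [hAL, if_pos rfl, if_pos trivial]
              rw [hWcr, hWr, pvJoin_cons_head]
              simp
            · have htwAL' : ((r.takeWhile (fun d => !pvSepA d)).any pvAL) = false := by
                simpa using htwAL
              cases hdw : r.dropWhile (fun d => !pvSepA d) with
              | nil =>
                exfalso
                have hr : r.takeWhile (fun d => !pvSepA d) = r := by
                  have := List.takeWhile_append_dropWhile (p := fun d => !pvSepA d) (l := r)
                  rw [hdw, List.append_nil] at this
                  exact this
                rw [hr, hrany] at htwAL'
                simp at htwAL'
              | cons e r3 =>
                have hsepE : pvSepA e = true := by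
                  have := pvDropWhile_head_false hdw
                  simpa using this
                have hsplit : r = r.takeWhile (fun d => !pvSepA d) ++ (e :: r3) := by
                  rw [← hdw, List.takeWhile_append_dropWhile]
                have hr3any : r3.any pvAL = true := by
                  have hx : r.any pvAL = ((r.takeWhile (fun d => !pvSepA d)).any pvAL
                      || (e :: r3).any pvAL) := by
                    conv_lhs => rw [hsplit]
                    rw [List.any_append]
                  rw [hrany, htwAL', List.any_cons, pvSepA_not_AL hsepE] at hx
                  simpa using hx.symm
                rw [pvPreB_true_of_sep_first htwAL' hdw]
                have hWr : pvW pvSepA r = pvW pvSepA r3 := by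
                  rw [pvW_TD_empty htwAL', hdw, pvW_cons_pos r3 hsepE]
                have hWcr : pvW pvSepA (c :: r) = [c] :: pvW pvSepA r3 := by
                  rw [pvW_TD htw, htwc, hdwc, hdw, pvW_cons_pos r3 hsepE, List.filter_cons]
                  simp only [hAL, if_pos rfl, if_pos trivial]
                  congr 2
                  rw [List.filter_eq_nil_iff]
                  intro x hx
                  have := (List.any_eq_false.mp htwAL') x hx
                  simp [this]
                rw [hWr, hWcr]
                obtain ⟨w, ws, hWr3⟩ : ∃ w ws, pvW pvSepA r3 = w :: ws := by
                  cases hW : pvW pvSepA r3 with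
                  | nil => exact absurd hW (pvW_hasAL (fun d hd => pvAL_not_sepA hd) r3 hr3any)
                  | cons w ws => exact ⟨w, ws, rfl⟩
                rw [hWr3, PySem.Chars.join_cons_cons]
                simp
        · -- c not alphanumeric
          have hAL' : pvAL c = false := by simpa using hAL
          have hrall : ¬ r.all (fun d => !pvAL d) = true := by
            intro hc
            exact hall ⟨by simp [hAL'], hc⟩
          have hrany : r.any pvAL = true := pvNotAll_any hrall
          by_cases hsep : pvSepA c = true
          · -- c is a separator
            rw [pvF_cons_sep r hsep]
            have hr2any : (r.dropWhile (fun d => !pvAL d)).any pvAL = true := by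
              have hx : r.any pvAL = ((r.takeWhile (fun d => !pvAL d)).any pvAL
                  || (r.dropWhile (fun d => !pvAL d)).any pvAL) := by
                conv_lhs => rw [← List.takeWhile_append_dropWhile (p := fun d => !pvAL d) (l := r)]
                rw [List.any_append]
              have htwf : (r.takeWhile (fun d => !pvAL d)).any pvAL = false := by
                rw [List.any_eq_false]
                intro x hx'
                have := List.mem_takeWhile_imp hx'
                simpa using this
              rw [hrany, htwf, Bool.false_or] at hx
              exact hx.symm
            obtain ⟨a, r2', hr2⟩ : ∃ a r2', r.dropWhile (fun d => !pvAL d) = a :: r2' := by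
              cases hW : r.dropWhile (fun d => !pvAL d) with
              | nil => rw [hW] at hr2any; simp at hr2any
              | cons a r2' => exact ⟨a, r2', rfl⟩
            have hALa : pvAL a = true := by
              have := pvDropWhile_head_false hr2
              simpa using this
            have hlen2 : (r.dropWhile (fun d => !pvAL d)).length ≤ n :=
              le_trans (List.length_dropWhile_le _ r) ht
            have ihr2 := ih (r.dropWhile (fun d => !pvAL d)) hlen2
            have hnall2 : ¬ (r.dropWhile (fun d => !pvAL d)).all (fun d => !pvAL d) = true := by
              intro hc
              have := (List.all_eq_true.mp hc) a (by rw [hr2]; exact List.mem_cons_self)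
              rw [hALa] at this
              simp at this
            rw [ihr2, if_neg hnall2]
            have hpre2 : pvPreB (r.dropWhile (fun d => !pvAL d)) = false := by
              rw [hr2]
              exact pvPreB_cons_AL r2' hALa
            rw [hpre2]
            have hprec : pvPreB (c :: r) = true := by
              rw [pvPreB_cons_notAL r hAL', hsep]
              simp
            rw [hprec]
            have hWc : pvW pvSepA (c :: r) = pvW pvSepA (r.dropWhile (fun d => !pvAL d)) := by
              rw [pvW_cons_pos r hsep, pvW_dropNotAL (fun d hd => pvAL_not_sepA hd) r]
            rw [hWc]
            rw [pvPostB_cons_anyAL (c := c) hrany, pvPostB_dropNotAL hr2any]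
            simp only [if_neg Bool.false_ne_true, if_pos trivial, List.singleton_append,
              List.nil_append, List.cons_append, List.append_assoc]
          · -- c is junk
            have hsep' : pvSepA c = false := by simpa using hsep
            rw [pvF_cons_junk r hAL' hsep']
            have ihr := ih r ht
            rw [ihr, if_neg hrall, pvPreB_cons_notAL r hAL', hsep', Bool.false_or,
              pvW_junk r hsep' hAL', pvPostB_cons_anyAL (c := c) hrany]

-- ---- stripping underscores ----
lemma pvStrip_pre_post {xs : List Char} (a b : List Char)
    (hne : xs ≠ []) (hh : ∀ h ∈ xs.head?, (h == '_') = false) (hl : ∀ l ∈ xs.getLast?, (l == '_') = false)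
    (ha : a = [] ∨ a = ['_']) (hb : b = [] ∨ b = ['_']) :
    PySem.Chars.stripChars (a ++ xs ++ b) ['_'] = xs := by
  have hpfun : (fun c => List.contains ['_'] c) = (fun c : Char => c == '_') := by
    funext c
    rw [List.contains_cons]
    simp
  obtain ⟨h0, xs', rfl⟩ : ∃ h0 xs', xs = h0 :: xs' := by
    cases xs with
    | nil => exact absurd rfl hne
    | cons h0 xs' => exact ⟨h0, xs', rfl⟩
  have hh0 : (h0 == '_') = false := hh h0 rfl
  rw [PySem.Chars.stripChars, hpfun]
  have hleft : List.dropWhile (fun c : Char => c == '_') (a ++ (h0 :: xs') ++ b) = (h0 :: xs') ++ b := by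
    rcases ha with rfl | rfl
    · rw [List.nil_append, List.cons_append, List.dropWhile_cons]
      simp [hh0]
    · rw [List.singleton_append]
      simp [List.dropWhile_cons, hh0]
  rw [hleft]
  have hright : List.dropWhile (fun c : Char => c == '_') (((h0 :: xs') ++ b).reverse) =
      (h0 :: xs').reverse := by
    rw [List.reverse_append]
    have hxs : List.dropWhile (fun c : Char => c == '_') ((h0 :: xs').reverse) = (h0 :: xs').reverse := by
      apply pvDropWhile_eq_self
      intro x hx
      rw [List.head?_reverse] at hx
      exact hl x hx
    rcases hb with rfl | rfl
    · rw [List.reverse_nil, List.nil_append, hxs]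
    · rw [List.reverse_singleton, List.singleton_append]
      simpa using hxs
  rw [hright, List.reverse_reverse]

lemma pvMainF (t : List Char) :
    PySem.Chars.stripChars (pvF t) ['_'] = PySem.Chars.join ['_'] (pvW pvSepA t) := by
  by_cases hall : t.all (fun c => !pvAL c) = true
  · rw [pvF_char t, if_pos hall, pvW_noAL t hall, PySem.Chars.join_nil]
    cases hany : t.any pvSepA
    · simp only [if_neg Bool.false_ne_true]
      decide
    · simp only [if_pos rfl, if_pos trivial]
      decide
  · have hany : t.any pvAL = true := pvNotAll_any hall
    rw [pvF_char t, if_neg hall]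
    have hWne : pvW pvSepA t ≠ [] := pvW_hasAL (fun d hd => pvAL_not_sepA hd) t hany
    obtain ⟨hne, hhd, hlast⟩ := pvJoin_bounds' '_' (fun c => !(c == '_')) (pvW pvSepA t) hWne
      (fun w hw => ⟨(pvW_words t w hw).1,
        fun c hc => by simp [pvAL_ne_underscore ((pvW_words t w hw).2 c hc)]⟩)
    exact pvStrip_pre_post _ _ hne
      (fun h hh => by simpa using hhd h hh)
      (fun l hl => by simpa using hlast l hl)
      (by cases h : pvPreB t <;> simp [h])
      (by cases h : pvPostB t <;> simp [h])

-- ---- split₀ = pvTok pvWS ----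
lemma pvGo : ∀ (s cur : List Char) (acc : List (List Char)), (∀ c ∈ cur, pvWS c = false) →
    PySem.Chars.split₀.go s cur acc = acc.reverse ++ pvTok pvWS (cur.reverse ++ s) := by
  intro s
  induction s with
  | nil =>
    intro cur acc hcur
    rw [PySem.Chars.split₀.go]
    cases cur with
    | nil => simp [pvTok_nil]
    | cons c0 cur' =>
      simp only [List.isEmpty_cons, if_neg (Bool.false_ne_true)]
      rw [List.append_nil, pvTok_all_neg (fun x hx => hcur x (List.mem_reverse.mp hx))
        (by simp), List.reverse_cons]
  | cons c s' ih =>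
    intro cur acc hcur
    rw [PySem.Chars.split₀.go]
    by_cases hws : PySem.Chars.isspace c = true
    · simp only [hws, if_pos rfl, if_pos trivial]
      cases cur with
      | nil =>
        simp only [List.isEmpty_nil, if_pos rfl, if_pos trivial]
        rw [ih [] acc (by simp)]
        simp [pvTok_cons_pos s' hws]
      | cons c0 cur' =>
        simp only [List.isEmpty_cons, if_neg (Bool.false_ne_true)]
        rw [ih [] (List.reverse (c0 :: cur') :: acc) (by simp)]
        rw [pvTok_append_boundary hws, pvTok_all_neg
          (fun x hx => hcur x (List.mem_reverse.mp hx)) (by simp)]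
        simp
    · have hws' : PySem.Chars.isspace c = false := by simpa using hws
      simp only [hws', if_neg (Bool.false_ne_true)]
      rw [ih (c :: cur) acc (by
        intro x hx
        rcases List.mem_cons.mp hx with rfl | hx'
        · exact hws'
        · exact hcur x hx')]
      rw [List.reverse_cons, List.append_assoc]
      rfl

lemma pvSplit₀ (s : List Char) : PySem.Chars.split₀ s = pvTok pvWS s := by
  rw [PySem.Chars.split₀, pvGo s [] [] (by simp)]
  simp

-- ---- whitespace normalisation is invisible ----
lemma pvStripId (parts : List (List Char)) (h : ∀ w ∈ parts, w ≠ [] ∧ ∀ c ∈ w, pvWS c = false) :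
    PySem.Chars.strip (PySem.Chars.join [' '] parts) = PySem.Chars.join [' '] parts := by
  cases hp : parts with
  | nil => simp [PySem.Chars.join_nil]; rfl
  | cons w ps =>
    subst hp
    obtain ⟨hne, hhd, hlast⟩ := pvJoin_bounds' ' ' (fun c => !pvWS c) (w :: ps)
      (List.cons_ne_nil _ _) (fun x hx => ⟨(h x hx).1, fun c hc => by simp [(h x hx).2 c hc]⟩)
    have h1 : List.dropWhile PySem.Chars.isspace (PySem.Chars.join [' '] (w :: ps)) =
        PySem.Chars.join [' '] (w :: ps) :=
      pvDropWhile_eq_self (fun x hx => by simpa using hhd x hx)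
    have h2 : List.dropWhile PySem.Chars.isspace (PySem.Chars.join [' '] (w :: ps)).reverse =
        (PySem.Chars.join [' '] (w :: ps)).reverse :=
      pvDropWhile_eq_self (fun x hx => by
        rw [List.head?_reverse] at hx
        simpa using hlast x hx)
    rw [PySem.Chars.strip, PySem.Chars.lstrip, PySem.Chars.rstrip, h1, h2, List.reverse_reverse]

lemma pvMapJoin {f : Char → Char} (hf : f ' ' = ' ') (parts : List (List Char)) :
    (PySem.Chars.join [' '] parts).map f = PySem.Chars.join [' '] (parts.map (List.map f)) := by
  induction parts with
  | nil => simp [PySem.Chars.join_nil]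
  | cons w ps ih =>
    cases ps with
    | nil => simp [PySem.Chars.join_singleton]
    | cons y zs =>
      rw [PySem.Chars.join_cons_cons, List.map_cons, List.map_cons, PySem.Chars.join_cons_cons,
        List.map_append, List.map_append, ih, List.map_cons]
      simp [hf]

lemma pvMapDropWhile (x : List Char) :
    List.map PySem.Chars.lowerChar (List.dropWhile PySem.Chars.isspace x) =
      List.dropWhile PySem.Chars.isspace (List.map PySem.Chars.lowerChar x) := by
  have hws : (PySem.Chars.isspace ∘ PySem.Chars.lowerChar) = PySem.Chars.isspace := by
    funext c
    exact pvWS_lowerChar c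
  rw [List.dropWhile_map, hws]

lemma pvLowerStrip (s : List Char) :
    PySem.Chars.lower (PySem.Chars.strip s) = PySem.Chars.strip (PySem.Chars.lower s) := by
  rw [PySem.Chars.strip, PySem.Chars.strip, PySem.Chars.lstrip, PySem.Chars.lstrip,
    PySem.Chars.rstrip, PySem.Chars.rstrip, PySem.Chars.lower, PySem.Chars.lower,
    List.map_reverse, pvMapDropWhile, List.map_reverse, pvMapDropWhile]

-- ---- word lists agree ----
lemma pvBridgeA (u : List Char) :
    pvW pvSepA (PySem.Chars.join [' '] (pvTok pvWS u)) = pvW pvQ u := by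
  have hsp : pvSepA ' ' = true := by decide
  rw [pvW_join hsp]
  have h1 : (pvTok pvWS u).flatMap (pvW pvSepA) = (pvTok pvWS u).flatMap (pvW pvQ) := by
    apply List.flatMap_congr
    intro w hw
    exact pvW_congr w (fun c hc => pvSepA_eq_q ((pvTok_sound u w hw).2 c hc))
  rw [h1]
  have h2 : ∀ c, pvWS c = true → pvQ c = true := by
    intro c hc
    simp [pvQ, hc]
  rw [pvW, pvTok_refine h2 u, List.map_flatMap, List.filter_flatMap]
  rfl

lemma pvBridgeB (u : List Char) : pvW pvWS (u.map pvSub) = pvW pvQ u := by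
  rw [pvW, pvTok_map pvWS_sub u]
  have hid : (pvTok pvQ u).map (List.map pvSub) = pvTok pvQ u := by
    have h1 : ∀ w ∈ pvTok pvQ u, List.map pvSub w = id w := by
      intro w hw
      have h2 : ∀ c ∈ w, pvSub c = id c := fun c hc => pvSub_id ((pvTok_sound u w hw).2 c hc)
      simpa using List.map_congr_left h2
    simpa using List.map_congr_left h1
  rw [hid]
  rfl

-- ===== VERDICT (by name: the statement is the Claim_ definition above) =====
theorem normalize_embedding_model_id_py_spec : Claim_equal_normalize_embedding_model_id_py := by
  intro value _
  unfold Spec_normalize_embedding_model_id_py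
  cases value with
  | none => decide
  | some v =>
    simp only [normalize_embedding_model_id_py, normalize_embedding_model_id_py_alt]
    -- the A-side text equals the whitespace-normalised form of u := lower v
    have hsub : (fun c => if c ∈ ['-', '_', '/', '.'] then ' ' else c) = pvSub := rfl
    have hlow : (PySem.Chars.lower v.toList) = v.toList.map PySem.Chars.lowerChar := rfl
    have htext : PySem.Chars.lower (PySem.Chars.strip
        (PySem.Chars.join [' '] (PySem.Chars.split₀ v.toList))) =
        PySem.Chars.join [' '] (pvTok pvWS (v.toList.map PySem.Chars.lowerChar)) := by
      rw [pvSplit₀, pvLowerStrip]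
      rw [show PySem.Chars.lower (PySem.Chars.join [' '] (pvTok pvWS v.toList)) =
          (PySem.Chars.join [' '] (pvTok pvWS v.toList)).map PySem.Chars.lowerChar from rfl]
      rw [pvMapJoin (by decide) (pvTok pvWS v.toList)]
      rw [← pvTok_map (f := PySem.Chars.lowerChar) (p := pvWS) (q := pvWS) pvWS_lowerChar v.toList]
      exact pvStripId _ (pvTok_sound _)
    rw [htext]
    -- A's loop, rewritten through pvR and pvF, produces join ['_'] (pvW pvQ u)
    have hA : PySem.Chars.stripChars
        ((PySem.Chars.join [' '] (pvTok pvWS (v.toList.map PySem.Chars.lowerChar))).foldl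
          (fun (st : List Char × Bool) c =>
            if PySem.Chars.isalnum c then (st.1 ++ [c], false)
            else if c ∈ ['-', '_', ' ', '/', '.'] then (if st.2 then st else (st.1 ++ ['_'], true))
            else st) (([] : List Char), false)).1 ['_'] =
        PySem.Chars.join ['_'] (pvW pvQ (v.toList.map PySem.Chars.lowerChar)) := by
      rw [pvFold_R, List.nil_append, (pvR_eq_F _).1, pvMainF, pvBridgeA]
    rw [hA]
    -- B's pipeline produces the same word list
    have hB : ((PySem.Chars.split₀
          ((PySem.Chars.lower v.toList).map (fun c => if c ∈ ['-', '_', '/', '.'] then ' ' else c))).map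
            (fun tok => tok.filter PySem.Chars.isalnum)).filter (fun w => !w.isEmpty) =
        pvW pvQ (v.toList.map PySem.Chars.lowerChar) := by
      rw [hsub, hlow, pvSplit₀, ← pvW, pvBridgeB]
    rw [hB]
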